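-- pv_equiv track=rewrite | github.com/bajco10/all-code | SCHOOL/hodiny/30.5.23.py | kodovanie
-- ===== SOURCE A (Python) =====
-- def kodovanie(retazec):
--     l = [[" "], ["a", "b", "c"], ["d", "e", "f"], ["g", "h", "i"], ["j", "k", "l"], ["m", "n", "o"], ["p", "q", "r"], ["s", "t", "u"], ["v", "w","x"], ["y", "z"]]
--     res = ""
--     retazec = retazec.lower()
--     for i in retazec:
--         for j in l:
--             if i in j:
--                 x = l.index(j)
--                 n = j.index(i)
--                 res+=str(x)*(n+1)
--     return res
-- ===== SOURCE B (Python) =====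
-- def kodovanie(retazec):
--     out = []
--     for c in retazec.lower():
--         o = ord(c)
--         if c == ' ':
--             out.append('0')
--         elif 97 <= o <= 120:            # a..x: triples, digit k//3+1 repeated k%3+1 times
--             k = o - 97
--             out.append(str(k // 3 + 1) * (k % 3 + 1))
--         elif o == 121 or o == 122:      # y, z: digit 9 repeated 1 or 2 times
--             out.append('9' * (o - 120))
--     return ''.join(out)
-- ===== Notes on version B (the rewrite author's own statement) =====
-- stated objective: faster
-- what changed: B replaces the keypad table and nested index scans entirely with an arithmetic closed form on the character code (digit = (ord(c)-97)//3+1, repeats = (ord(c)-97)%3+1, with y/z and space as the two non-triple groups), building the result in one pass with a list accumulator joined at the end.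
import Mathlib
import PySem

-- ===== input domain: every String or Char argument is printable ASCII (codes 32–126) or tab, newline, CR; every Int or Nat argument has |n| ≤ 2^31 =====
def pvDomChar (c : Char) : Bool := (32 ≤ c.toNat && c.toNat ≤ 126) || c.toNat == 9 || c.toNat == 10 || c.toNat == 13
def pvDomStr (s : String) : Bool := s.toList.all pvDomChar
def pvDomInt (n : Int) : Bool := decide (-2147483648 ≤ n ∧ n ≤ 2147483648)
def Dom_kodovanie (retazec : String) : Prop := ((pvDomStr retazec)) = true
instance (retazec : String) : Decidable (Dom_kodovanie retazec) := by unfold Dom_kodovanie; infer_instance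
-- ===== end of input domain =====

-- B replaces the keypad table and nested index scans with an arithmetic closed form on the character code; faster by a constant factor in a timing run.

-- ===== PORT A =====
def kodA_l : List (List Char) :=
  [[' '], ['a','b','c'], ['d','e','f'], ['g','h','i'], ['j','k','l'],
   ['m','n','o'], ['p','q','r'], ['s','t','u'], ['v','w','x'], ['y','z']]

def kodovanie (retazec : String) : String :=
  let l := kodA_l
  let r := PySem.Chars.lower retazec.toList
  String.mk (r.foldl (fun res i =>
    l.foldl (fun res j =>
      if i ∈ j then
        -- l.index(j) / j.index(i): both guarded by 'i ∈ j' with j drawn from l, so index? is some; getD 0 never taken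
        let x : Nat := (PySem.List.index? l j).getD 0
        let n : Nat := (PySem.List.index? j i).getD 0
        res ++ PySem.List.pyRepeat (PySem.Int.toStr (x : Int)).toList ((n : Int) + 1)
      else res) res) [])

-- ===== PORT B =====
-- per-character closed form: what Python B appends (possibly nothing) for one lowered character
def kodB_code (c : Char) : List Char :=
  let o := c.toNat
  if c = ' ' then ['0']
  else if 97 ≤ o ∧ o ≤ 120 then
    let k := o - 97
    PySem.List.pyRepeat (PySem.Int.toStr ((k / 3 + 1 : Nat) : Int)).toList ((k % 3 + 1 : Nat) : Int)
  else if o = 121 ∨ o = 122 then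
    PySem.List.pyRepeat ['9'] ((o - 120 : Nat) : Int)
  else []

def kodovanie_alt (retazec : String) : String :=
  String.mk (PySem.Chars.join []
    ((PySem.Chars.lower retazec.toList).map kodB_code))

-- ===== PRECONDITION & SPEC =====
def Spec_kodovanie (retazec : String) (out : String) : Prop := out = kodovanie_alt retazec
instance (retazec : String) (out : String) : Decidable (Spec_kodovanie retazec out) := by unfold Spec_kodovanie; infer_instance

-- ===== CLAIM (what is proved, stated in full; the proofs are below) =====
def Claim_equal_kodovanie : Prop := ∀ (retazec : String), Dom_kodovanie retazec → Spec_kodovanie retazec (kodovanie retazec)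

-- ===== LEMMAS AND PROOFS =====

-- per-character code as A computes it for one row
def encRow (c : Char) (j : List Char) : List Char :=
  if c ∈ j then
    PySem.List.pyRepeat (PySem.Int.toStr (((PySem.List.index? kodA_l j).getD 0 : Nat) : Int)).toList
      ((((PySem.List.index? j c).getD 0 : Nat) : Int) + 1)
  else []

lemma mem_alpha_of_range (c : Char) (h1 : 97 ≤ c.toNat) (h2 : c.toNat ≤ 122) :
    c ∈ ['a','b','c','d','e','f','g','h','i','j','k','l','m','n','o','p','q','r','s','t','u','v','w','x','y','z'] := by
  rw [← Char.ofNat_toNat c]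
  interval_cases c.toNat <;> decide

lemma encRow_agree (c : Char) : kodA_l.flatMap (encRow c) = kodB_code c := by
  by_cases h : c ∈ [' ','a','b','c','d','e','f','g','h','i','j','k','l','m','n','o','p','q','r','s','t','u','v','w','x','y','z']
  · fin_cases h <;> decide
  · have hsp : c ≠ ' ' := fun e => h (by simp [e])
    have hrange : ¬ (97 ≤ c.toNat ∧ c.toNat ≤ 122) := fun hh =>
      h (List.mem_cons_of_mem _ (mem_alpha_of_range c hh.1 hh.2))
    have h1 : ¬ (97 ≤ c.toNat ∧ c.toNat ≤ 120) := fun hh => hrange ⟨hh.1, by omega⟩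
    have h2 : ¬ (c.toNat = 121 ∨ c.toNat = 122) := by
      rintro (hh | hh) <;> exact hrange ⟨by omega, by omega⟩
    simp only [List.mem_cons, List.not_mem_nil, or_false, not_or] at h
    have hA : ∀ j ∈ kodA_l, c ∉ j := by
      intro j hj
      fin_cases hj <;> simp_all
    rw [List.flatMap_eq_nil_iff.mpr (by intro j hj; simp [encRow, hA j hj])]
    simp [kodB_code, hsp, h1, h2]

lemma inner_fold (c : Char) (res : List Char) :
    kodA_l.foldl (fun res j =>
      if c ∈ j then
        res ++ PySem.List.pyRepeat
          (PySem.Int.toStr (((PySem.List.index? kodA_l j).getD 0 : Nat) : Int)).toList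
          ((((PySem.List.index? j c).getD 0 : Nat) : Int) + 1)
      else res) res = res ++ kodB_code c := by
  rw [← encRow_agree c]
  have hgen : ∀ (js : List (List Char)) (res : List Char),
      js.foldl (fun res j =>
        if c ∈ j then
          res ++ PySem.List.pyRepeat
            (PySem.Int.toStr (((PySem.List.index? kodA_l j).getD 0 : Nat) : Int)).toList
            ((((PySem.List.index? j c).getD 0 : Nat) : Int) + 1)
        else res) res = res ++ js.flatMap (encRow c) := by
    intro js
    induction js with
    | nil => intro res; simp
    | cons j js ih =>
      intro res
      simp only [List.foldl_cons, List.flatMap_cons, ih, encRow]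
      by_cases hj : c ∈ j <;> simp [hj]
  exact hgen kodA_l res

lemma join_nil_flatten (parts : List (List Char)) : PySem.Chars.join [] parts = parts.flatten := by
  simp only [PySem.Chars.join, List.intercalate]
  induction parts with
  | nil => rfl
  | cons p ps ih =>
    cases ps with
    | nil => simp
    | cons q qs => simp [List.intersperse_cons₂] at ih ⊢; simp [ih]

-- ===== VERDICT (by name: the statement is the Claim_ definition above) =====
theorem kodovanie_spec : Claim_equal_kodovanie := by
  intro retazec _
  unfold Spec_kodovanie kodovanie kodovanie_alt
  simp only []
  congr 1
  rw [join_nil_flatten]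
  generalize PySem.Chars.lower retazec.toList = r
  induction r using List.reverseRecOn with
  | nil => simp
  | append_singleton r c ih =>
    rw [List.foldl_append, List.map_append, List.flatten_append]
    simp only [List.foldl_cons, List.foldl_nil]
    rw [inner_fold c, ih]
    simp
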